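-- pv_equiv track=rewrite | github.com/Nodirovic/dars | masala5.py | buildStairCase
-- ===== SOURCE A (Python) =====
-- def buildStairCase(height: int, material: str) -> list:
--     lst = list()
--     for i in range(height):
--         a = list()
--         for j in range(height):
--             a.append(material) if j <= i else a.append("_")
--         lst.append(a)
--     return lst
-- ===== SOURCE B (Python) =====
-- def buildStairCase(height: int, material: str) -> list:
--     return [[material] * (i + 1) + ["_"] * (height - 1 - i) for i in range(height)]
-- ===== Notes on version B (the rewrite author's own statement) =====
-- stated objective: simpler
-- what changed: Each row is built by list replication from the two run lengths (i+1 materials, height-1-i underscores) in a single comprehension, instead of an inner per-column loop with a branch.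
import Mathlib
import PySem

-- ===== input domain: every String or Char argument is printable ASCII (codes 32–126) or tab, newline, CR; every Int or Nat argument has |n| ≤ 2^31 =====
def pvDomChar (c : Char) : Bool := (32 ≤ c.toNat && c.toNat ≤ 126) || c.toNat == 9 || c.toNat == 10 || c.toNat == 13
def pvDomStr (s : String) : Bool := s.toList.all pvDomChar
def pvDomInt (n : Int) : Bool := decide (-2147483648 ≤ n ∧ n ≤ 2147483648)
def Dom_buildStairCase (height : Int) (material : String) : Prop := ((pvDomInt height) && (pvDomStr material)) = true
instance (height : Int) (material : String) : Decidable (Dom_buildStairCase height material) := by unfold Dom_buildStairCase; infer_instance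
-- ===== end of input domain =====

-- ===== PORT A =====
def buildStairCase (height : Int) (material : String) : List (List String) :=
  (PySem.List.pyRange 0 height 1).foldl (fun lst i =>
    lst ++ [(PySem.List.pyRange 0 height 1).foldl (fun a j =>
      if j ≤ i then a ++ [material] else a ++ ["_"]) []]) []

-- ===== PORT B =====
-- B: each row from the two run lengths by replication (simpler decomposition, no inner branch loop)
def buildStairCase_alt (height : Int) (material : String) : List (List String) :=
  (PySem.List.pyRange 0 height 1).map (fun i =>
    List.replicate (i + 1).toNat material ++ List.replicate (height - 1 - i).toNat "_")

-- ===== PRECONDITION & SPEC =====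
def Spec_buildStairCase (height : Int) (material : String) (out : List (List String)) : Prop := out = buildStairCase_alt height material
instance (height : Int) (material : String) (out : List (List String)) : Decidable (Spec_buildStairCase height material out) := by unfold Spec_buildStairCase; infer_instance

-- ===== CLAIM (what is proved, stated in full; the proofs are below) =====
def Claim_equal_buildStairCase : Prop := ∀ (height : Int) (material : String), Dom_buildStairCase height material → Spec_buildStairCase height material (buildStairCase height material)

-- ===== LEMMAS AND PROOFS =====

-- ===== VERDICT (by name: the statement is the Claim_ definition above) =====
-- one row of A equals the replicated row of B, for 0 ≤ i < height
theorem pvRow (height i : Int) (material : String) (h0 : 0 ≤ i) (h1 : i < height) :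
    (PySem.List.pyRange 0 height 1).foldl (fun a j =>
      if j ≤ i then a ++ [material] else a ++ ["_"]) []
    = List.replicate (i + 1).toNat material ++ List.replicate (height - 1 - i).toNat "_" := by
  have hsplit := PySem.List.pyRange_one_append 0 (i + 1) height (by omega) (by omega)
  have hfold : ∀ (l : List Int) (acc : List String),
      l.foldl (fun a j => if j ≤ i then a ++ [material] else a ++ ["_"]) acc
      = acc ++ l.map (fun j => if j ≤ i then material else "_") := by
    intro l
    induction l with
    | nil => simp
    | cons x xs ih => intro acc; by_cases hx : x ≤ i <;> simp [hx, ih]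
  rw [hfold, hsplit]
  have hm1 : (PySem.List.pyRange 0 (i + 1) 1).map (fun j => if j ≤ i then material else "_")
      = List.replicate (i + 1).toNat material := by
    rw [List.map_congr_left (g := fun _ => material)
      (fun j hj => by
        have := (PySem.List.mem_pyRange_one).mp hj
        simp [show j ≤ i by omega])]
    rw [List.map_const']
    simp [PySem.List.length_pyRange_one]
  have hm2 : (PySem.List.pyRange (i + 1) height 1).map (fun j => if j ≤ i then material else "_")
      = List.replicate (height - 1 - i).toNat "_" := by
    rw [List.map_congr_left (g := fun _ => "_")
      (fun j hj => by
        have := (PySem.List.mem_pyRange_one).mp hj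
        simp [show ¬ j ≤ i by omega])]
    rw [List.map_const']
    rw [PySem.List.length_pyRange_one]
    congr 1
    omega
  simp only [List.map_append, hm1, hm2, List.nil_append]

theorem buildStairCase_spec : Claim_equal_buildStairCase := by
  intro height material _
  unfold Spec_buildStairCase buildStairCase buildStairCase_alt
  rw [PySem.List.foldl_append_singleton_eq_map]
  simp only [List.nil_append]
  exact List.map_congr_left (fun i hi => by
    have := (PySem.List.mem_pyRange_one).mp hi
    exact pvRow height i material this.1 this.2)
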